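-- pv_equiv track=rewrite | github.com/Nanazuzu/PythonLearn | 2025_05_19/2025_05_19(2).py | elevator_simulation
-- ===== SOURCE A (Python) =====
-- def elevator_simulation(requests: list[int]) -> list[str]:
--   req = requests[::-1]
--   start = '1'
--   res = []
--   while(len(req) != 0):
--     end = str(req.pop())
--     if start == end:
--       continue
--     res.append(start + ' -> ' + end)
--     start = end
--   return res
-- ===== SOURCE B (Python) =====
-- from itertools import groupby
--
--
-- def elevator_simulation(requests: list[int]) -> list[str]:
--     seq = ['1'] + [str(r) for r in requests]
--     dedup = [k for k, _ in groupby(seq)]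
--     return [a + ' -> ' + b for a, b in zip(dedup, dedup[1:])]
-- ===== Notes on version B (the rewrite author's own statement) =====
-- stated objective: idiomatic
-- what changed: Replaced the mutating reverse/pop while-loop carrying a running start with a groupby dedup of the full position sequence followed by zip-adjacent pairing.
import Mathlib
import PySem

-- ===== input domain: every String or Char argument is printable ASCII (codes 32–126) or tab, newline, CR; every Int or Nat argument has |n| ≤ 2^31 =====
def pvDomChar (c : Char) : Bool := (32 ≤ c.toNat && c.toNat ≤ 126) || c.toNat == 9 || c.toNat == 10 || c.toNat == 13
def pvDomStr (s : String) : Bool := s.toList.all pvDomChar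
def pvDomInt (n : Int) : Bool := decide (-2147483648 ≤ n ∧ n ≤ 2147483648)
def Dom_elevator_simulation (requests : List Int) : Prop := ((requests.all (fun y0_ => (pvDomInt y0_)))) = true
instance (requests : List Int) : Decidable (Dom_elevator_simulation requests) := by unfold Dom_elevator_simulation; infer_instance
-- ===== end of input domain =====

-- B replaces A's reverse/pop while-loop (running start, skip-on-equal) with a
-- consecutive-duplicate collapse of the full position sequence followed by
-- adjacent-pair zipping; equal return value on all inputs (idiomatic objective).

-- ===== PORT A =====
-- while loop: req.pop() takes the LAST element of req (= requests reversed);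
-- recursion on req via getLast?/dropLast mirrors pop exactly.
def pvALoop (req : List Int) (start : String) (res : List String) : List String :=
  match hg : req.getLast? with
  | none => res
  | some x =>
    let e := PySem.Int.toStr x
    if start == e then pvALoop req.dropLast start res
    else pvALoop req.dropLast e (res ++ [start ++ " -> " ++ e])
termination_by req.length
decreasing_by all_goals
  · have : req ≠ [] := by intro hn; simp [hn] at hg
    cases req with
    | nil => exact absurd rfl this
    | cons a t => simp [List.length_dropLast]

def elevator_simulation (requests : List Int) : List String :=
  match PySem.List.slice? requests none none (-1) with
  | none => []   -- unreachable: step = -1 ≠ 0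
  | some req => pvALoop req "1" []

-- ===== PORT B =====
-- [k for k,_ in groupby(seq)]: collapse consecutive duplicates
def pvCollapse : List String → List String
  | [] => []
  | [x] => [x]
  | x :: y :: rest => if x == y then pvCollapse (y :: rest) else x :: pvCollapse (y :: rest)

def elevator_simulation_alt (requests : List Int) : List String :=
  let seq := "1" :: requests.map PySem.Int.toStr
  let dedup := pvCollapse seq
  (dedup.zip dedup.tail).map (fun p => p.1 ++ " -> " ++ p.2)

-- ===== PRECONDITION & SPEC =====
def Spec_elevator_simulation (requests : List Int) (out : List String) : Prop := out = elevator_simulation_alt requests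
instance (requests : List Int) (out : List String) : Decidable (Spec_elevator_simulation requests out) := by unfold Spec_elevator_simulation; infer_instance

-- ===== CLAIM (what is proved, stated in full; the proofs are below) =====
def Claim_equal_elevator_simulation : Prop := ∀ (requests : List Int), Dom_elevator_simulation requests → Spec_elevator_simulation requests (elevator_simulation requests)

-- ===== LEMMAS AND PROOFS =====

-- forward reformulation of A's loop (processing requests front-to-back)
def pvFwd : List Int → String → List String → List String
  | [], _, res => res
  | x :: rest, start, res =>
    let e := PySem.Int.toStr x
    if start == e then pvFwd rest start res
    else pvFwd rest e (res ++ [start ++ " -> " ++ e])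

theorem pvALoop_reverse (l : List Int) : ∀ (s : String) (res : List String),
    pvALoop l.reverse s res = pvFwd l s res := by
  induction l with
  | nil => intro s res; simp [pvALoop, pvFwd]
  | cons x t ih =>
    intro s res
    rw [pvALoop]
    have hg : (x :: t).reverse.getLast? = some x := by
      simp [List.getLast?_reverse]
    have hd : (x :: t).reverse.dropLast = t.reverse := by
      simp [List.reverse_cons]
    split
    · next hn => rw [hg] at hn; exact absurd hn (by simp)
    · next x1 hx1 =>
      rw [hg] at hx1
      have hxx : x1 = x := by simpa using hx1.symm
      subst hxx
      rw [hd]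
      by_cases h : s == PySem.Int.toStr x1 <;> simp [pvFwd, h, ih]

def pvPairs (d : List String) : List String :=
  (d.zip d.tail).map (fun p => p.1 ++ " -> " ++ p.2)

theorem pvCollapse_head (t : List String) : ∀ (y : String),
    ∃ t', pvCollapse (y :: t) = y :: t' := by
  induction t with
  | nil => intro y; exact ⟨[], rfl⟩
  | cons z r ih =>
    intro y
    by_cases h : y == z
    · obtain ⟨t', ht⟩ := ih z
      have hy : y = z := by simpa using h
      exact ⟨t', by simp [pvCollapse, hy, ht]⟩
    · exact ⟨pvCollapse (z :: r), by simp [pvCollapse, h]⟩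

theorem pvFwd_eq_pairs (l : List Int) : ∀ (s : String) (res : List String),
    pvFwd l s res = res ++ pvPairs (pvCollapse (s :: l.map PySem.Int.toStr)) := by
  induction l with
  | nil => intro s res; simp [pvFwd, pvCollapse, pvPairs]
  | cons x t ih =>
    intro s res
    simp only [List.map_cons]
    by_cases h : s == PySem.Int.toStr x
    · have hs : s = PySem.Int.toStr x := by simpa using h
      simp only [pvFwd, pvCollapse, h, if_pos]
      rw [ih, hs]
    · simp only [pvFwd, pvCollapse, h, Bool.false_eq_true, if_false]
      rw [ih]
      obtain ⟨t', ht⟩ := pvCollapse_head (t.map PySem.Int.toStr) (PySem.Int.toStr x)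
      rw [ht]
      simp [pvPairs, List.append_assoc]

-- ===== VERDICT (by name: the statement is the Claim_ definition above) =====
theorem elevator_simulation_spec : Claim_equal_elevator_simulation := by
  intro requests _
  unfold Spec_elevator_simulation elevator_simulation elevator_simulation_alt
  rw [PySem.List.slice?_none_none_neg_one]
  simp only []
  rw [pvALoop_reverse, pvFwd_eq_pairs]
  simp [pvPairs]
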